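-- pv_equiv track=rewrite | github.com/Charybdis2/Chess-Checker | main.py | check_rowcolumn
-- ===== SOURCE A (Python) =====
-- def get_piece(board, r, c):
--     #to make sure the code doesn't break if it tries to check if there is a knight or any piece off the board
--     if r < 0 or r >7 or c > 7 or c < 0:
--         return "."
--     return board[r][c]
--
-- def check_rowcolumn(board, kr, kc):
--     #Checks the whole row & column if there is a queen, rook or if a piece is blocking it
--     for ro, co in [(1,0), (0,1), (-1,0), (0,-1)]:
--         r = kr
--         c = kc
--         while r >= 0 and r <=7 and c>=0 and c<=7:
--             r = r+ro
--             c = c+co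
--             piece = get_piece(board, r, c)
--             if piece == "Q" or piece == "R":
--                  return True
--             if piece != ".":
--                 break
--     return False
-- ===== SOURCE B (Python) =====
-- def _first_blocker_hits(half):
--     for piece in half:
--         if piece != '.':
--             return piece in ('Q', 'R')
--     return False
--
-- def check_rowcolumn(board, kr, kc):
--     # Materialize the king's row and column, split each at the king into the
--     # two outward half-lines, and test the nearest piece of each half-line.
--     if not (0 <= kr <= 7 and 0 <= kc <= 7):
--         return False
--     row = board[kr][:8]
--     col = [board[r][kc] for r in range(8)]
--     halves = [row[kc+1:], row[:kc][::-1], col[kr+1:], col[:kr][::-1]]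
--     return any(_first_blocker_hits(h) for h in halves)
-- ===== Notes on version B (the rewrite author's own statement) =====
-- stated objective: alternative
-- what changed: Instead of ray-stepping cell-by-cell in four directions through a bounds-guarded get_piece, B materializes the king's row and column as lists, splits each at the king's index into two outward half-lines, and tests whether the first non-'.' element of any half-line is 'Q' or 'R'.
-- outside the precondition, e.g. on check_rowcolumn([['.', 'B'], ['B'], [], [], [], [], [], []], 0, 0): A returns False, B raises IndexError
import Mathlib
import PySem

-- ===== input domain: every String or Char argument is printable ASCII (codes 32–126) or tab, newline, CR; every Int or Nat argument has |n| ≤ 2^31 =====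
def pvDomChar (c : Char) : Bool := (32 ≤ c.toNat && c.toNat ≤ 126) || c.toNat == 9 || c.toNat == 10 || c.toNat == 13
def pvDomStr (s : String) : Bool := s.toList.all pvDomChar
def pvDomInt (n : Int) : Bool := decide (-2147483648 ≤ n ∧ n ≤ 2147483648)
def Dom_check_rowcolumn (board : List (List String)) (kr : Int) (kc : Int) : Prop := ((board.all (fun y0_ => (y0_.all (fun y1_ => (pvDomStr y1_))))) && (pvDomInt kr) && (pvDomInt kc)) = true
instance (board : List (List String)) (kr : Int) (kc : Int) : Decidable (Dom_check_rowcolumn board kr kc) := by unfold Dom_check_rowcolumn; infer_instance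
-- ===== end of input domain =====

-- B splits the king's row/column into outward half-lines and tests the nearest piece of
-- each, instead of A's four-direction cell-by-cell ray stepping (alternative decomposition).

-- ===== PORT A =====
def get_piece (board : List (List String)) (r : Int) (c : Int) : String :=
  if r < 0 ∨ r > 7 ∨ c > 7 ∨ c < 0 then "."
  else ((PySem.List.pyGet? board r).bind (fun row => PySem.List.pyGet? row c)).getD "#"
  -- board[r][c]; the IndexError case (none) is excluded by Pre_, "#" is the dead default

-- the while loop of one direction (ro, co); Python's loop runs the body at most 8 times,
-- fuel 9 is therefore sufficient and exact
def scanDir (board : List (List String)) (ro co : Int) : Nat → Int → Int → Bool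
  | 0, _, _ => false
  | f + 1, r, c =>
    if r ≥ 0 ∧ r ≤ 7 ∧ c ≥ 0 ∧ c ≤ 7 then
      let r' := r + ro
      let c' := c + co
      let piece := get_piece board r' c'
      if piece = "Q" ∨ piece = "R" then true
      else if piece ≠ "." then false
      else scanDir board ro co f r' c'
    else false

def check_rowcolumn (board : List (List String)) (kr : Int) (kc : Int) : Bool :=
  scanDir board 1 0 9 kr kc || (scanDir board 0 1 9 kr kc ||
    (scanDir board (-1) 0 9 kr kc || scanDir board 0 (-1) 9 kr kc))

-- ===== PORT B =====
def first_blocker_hits : List String → Bool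
  | [] => false
  | piece :: rest =>
    if piece ≠ "." then (piece == "Q" || piece == "R") else first_blocker_hits rest

def check_rowcolumn_alt (board : List (List String)) (kr : Int) (kc : Int) : Bool :=
  if 0 ≤ kr ∧ kr ≤ 7 ∧ 0 ≤ kc ∧ kc ≤ 7 then
    let row := PySem.List.slice ((PySem.List.pyGet? board kr).getD []) none (some 8)
    let col := (PySem.List.pyRange 0 8 1).map
      (fun r => ((PySem.List.pyGet? board r).bind (fun rw => PySem.List.pyGet? rw kc)).getD "#")
    let halves := [PySem.List.slice row (some (kc + 1)) none,
                   (PySem.List.slice row none (some kc)).reverse,   -- row[:kc][::-1]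
                   PySem.List.slice col (some (kr + 1)) none,
                   (PySem.List.slice col none (some kr)).reverse]   -- col[:kr][::-1]
    halves.any first_blocker_hits
  else false

-- ===== PRECONDITION & SPEC =====
-- Pre_ excludes inputs where the king square is on the 8x8 board but the board is not at
-- least 8x8: there A's board[r][c] can raise IndexError, and on the few such boards where an
-- early blocker lets A return, B (which materializes the whole row and column) raises instead.
def Pre_check_rowcolumn (board : List (List String)) (kr : Int) (kc : Int) : Prop :=
  (0 ≤ kr ∧ kr ≤ 7 ∧ 0 ≤ kc ∧ kc ≤ 7) →
    (8 ≤ board.length ∧ ∀ row ∈ board.take 8, 8 ≤ row.length)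
instance (board : List (List String)) (kr : Int) (kc : Int) : Decidable (Pre_check_rowcolumn board kr kc) := by unfold Pre_check_rowcolumn; infer_instance

def pvWitness_check_rowcolumn : List (List String) × Int × Int :=
  ([[".", ".", ".", ".", ".", ".", ".", "."],
    [".", ".", ".", ".", ".", ".", ".", "."],
    [".", ".", ".", "R", ".", ".", ".", "."],
    [".", ".", ".", ".", ".", ".", ".", "."],
    [".", ".", ".", ".", ".", ".", ".", "."],
    [".", ".", ".", ".", ".", ".", ".", "."],
    [".", ".", ".", ".", ".", ".", ".", "."],
    [".", ".", ".", ".", ".", ".", ".", "."]], 2, 5)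

def Spec_check_rowcolumn (board : List (List String)) (kr : Int) (kc : Int) (out : Bool) : Prop := out = check_rowcolumn_alt board kr kc
instance (board : List (List String)) (kr : Int) (kc : Int) (out : Bool) : Decidable (Spec_check_rowcolumn board kr kc out) := by unfold Spec_check_rowcolumn; infer_instance

-- ===== CLAIM (what is proved, stated in full; the proofs are below) =====
def Claim_equal_check_rowcolumn : Prop := ∀ (board : List (List String)) (kr : Int) (kc : Int), Dom_check_rowcolumn board kr kc → Pre_check_rowcolumn board kr kc → Spec_check_rowcolumn board kr kc (check_rowcolumn board kr kc)

-- ===== LEMMAS AND PROOFS =====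

lemma scanDir_out (board : List (List String)) (ro co : Int) (f : Nat) (r c : Int)
    (h : ¬ (r ≥ 0 ∧ r ≤ 7 ∧ c ≥ 0 ∧ c ≤ 7)) : scanDir board ro co f r c = false := by
  cases f with
  | zero => rfl
  | succ f => simp [scanDir, h]

-- rightwards along the king's row: A's (0,1) scan is B's scan of row[c+1:]
lemma scan_right (board : List (List String)) (kr : Int) (L : List String)
    (hkr0 : 0 ≤ kr) (hkr7 : kr ≤ 7) (hL : L.length = 8)
    (hcell : ∀ i : Nat, i < 8 → L[i]? = some (get_piece board kr (i : Int))) :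
    ∀ (f : Nat) (c : Int), 0 ≤ c → c ≤ 7 → 8 ≤ f + c.toNat →
      scanDir board 0 1 f kr c = first_blocker_hits (L.drop (c.toNat + 1)) := by
  intro f
  induction f with
  | zero => intro c hc0 hc7 hf; omega
  | succ f ih =>
    intro c hc0 hc7 hf
    have hcond : kr ≥ 0 ∧ kr ≤ 7 ∧ c ≥ 0 ∧ c ≤ 7 := ⟨hkr0, hkr7, hc0, hc7⟩
    simp only [scanDir, if_pos hcond]
    by_cases h7 : c = 7
    · subst h7
      have hp : get_piece board (kr + 0) (7 + 1) = "." := by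
        simp [get_piece]
      rw [hp]
      have hdrop : L.drop ((7 : Int).toNat + 1) = [] := by
        apply List.drop_eq_nil_of_le; omega
      rw [hdrop]
      simp [first_blocker_hits]
      exact scanDir_out board 0 1 f kr 8 (by omega)
    · have hc7' : c + 1 ≤ 7 := by omega
      set piece := get_piece board (kr + 0) (c + 1) with hpdef
      have hcast : ((c.toNat + 1 : Nat) : Int) = c + 1 := by omega
      have hlt : c.toNat + 1 < 8 := by omega
      have hget : L[c.toNat + 1]? = some piece := by
        rw [hcell (c.toNat + 1) hlt, hcast]
        simp [hpdef]
      have hdrop : L.drop (c.toNat + 1) = piece :: L.drop (c.toNat + 1 + 1) := by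
        rw [List.drop_eq_getElem_cons (by omega)]
        have : L[c.toNat + 1] = piece := by
          have := hget; rwa [List.getElem?_eq_getElem (by omega), Option.some.injEq] at this
        rw [this]
      rw [hdrop]
      by_cases hQ : piece = "Q" ∨ piece = "R"
      · have hne : piece ≠ "." := by rcases hQ with h | h <;> simp [h]
        simp only [first_blocker_hits, if_pos hQ, if_pos hne]
        rcases hQ with h | h <;> simp [h]
      · by_cases hdot : piece = "."
        · have hrec := ih (c + 1) (by omega) hc7' (by omega)
          have : (c + 1).toNat + 1 = c.toNat + 1 + 1 := by omega
          rw [this] at hrec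
          simp only [first_blocker_hits, hdot]
          simpa [hdot] using hrec
        · simp only [first_blocker_hits, if_neg hQ, if_pos hdot]
          simp
          constructor
          · intro h; exact hQ (Or.inl h)
          · intro h; exact hQ (Or.inr h)

-- leftwards along the king's row: A's (0,-1) scan is B's scan of row[:c][::-1]
lemma scan_left (board : List (List String)) (kr : Int) (L : List String)
    (hkr0 : 0 ≤ kr) (hkr7 : kr ≤ 7) (hL : L.length = 8)
    (hcell : ∀ i : Nat, i < 8 → L[i]? = some (get_piece board kr (i : Int))) :
    ∀ (f : Nat) (c : Int), 0 ≤ c → c ≤ 7 → c.toNat + 1 ≤ f →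
      scanDir board 0 (-1) f kr c = first_blocker_hits (L.take c.toNat).reverse := by
  intro f
  induction f with
  | zero => intro c hc0 hc7 hf; omega
  | succ f ih =>
    intro c hc0 hc7 hf
    have hcond : kr ≥ 0 ∧ kr ≤ 7 ∧ c ≥ 0 ∧ c ≤ 7 := ⟨hkr0, hkr7, hc0, hc7⟩
    simp only [scanDir, if_pos hcond]
    by_cases h0 : c = 0
    · subst h0
      have hp : get_piece board (kr + 0) (0 + -1) = "." := by
        simp [get_piece]
      rw [hp]
      simp [first_blocker_hits]
      exact scanDir_out board 0 (-1) f kr (-1) (by omega)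
    · set piece := get_piece board (kr + 0) (c + -1) with hpdef
      have hcast : ((c.toNat - 1 : Nat) : Int) = c + -1 := by omega
      have hlt : c.toNat - 1 < 8 := by omega
      have hget : L[c.toNat - 1]? = some piece := by
        rw [hcell (c.toNat - 1) hlt, hcast]
        simp [hpdef]
      have hgetE : L[c.toNat - 1] = piece := by
        have := hget; rwa [List.getElem?_eq_getElem (by omega), Option.some.injEq] at this
      have htake : L.take c.toNat = L.take (c.toNat - 1) ++ [piece] := by
        have h1 : c.toNat = (c.toNat - 1) + 1 := by omega
        rw [h1, List.take_add_one, List.getElem?_eq_getElem (by omega), hgetE]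
        rfl
      rw [htake, List.reverse_append, List.reverse_singleton, List.singleton_append]
      by_cases hQ : piece = "Q" ∨ piece = "R"
      · have hne : piece ≠ "." := by rcases hQ with h | h <;> simp [h]
        simp only [first_blocker_hits, if_pos hQ, if_pos hne]
        rcases hQ with h | h <;> simp [h]
      · by_cases hdot : piece = "."
        · have hrec := ih (c + -1) (by omega) (by omega) (by omega)
          have : (c + -1).toNat = c.toNat - 1 := by omega
          rw [this] at hrec
          simp only [first_blocker_hits, hdot]
          simpa [hdot] using hrec
        · simp only [first_blocker_hits, if_neg hQ, if_pos hdot]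
          simp
          constructor
          · intro h; exact hQ (Or.inl h)
          · intro h; exact hQ (Or.inr h)

-- downwards along the king's column: A's (1,0) scan is B's scan of col[r+1:]
lemma scan_down (board : List (List String)) (kc : Int) (L : List String)
    (hkc0 : 0 ≤ kc) (hkc7 : kc ≤ 7) (hL : L.length = 8)
    (hcell : ∀ i : Nat, i < 8 → L[i]? = some (get_piece board (i : Int) kc)) :
    ∀ (f : Nat) (r : Int), 0 ≤ r → r ≤ 7 → 8 ≤ f + r.toNat →
      scanDir board 1 0 f r kc = first_blocker_hits (L.drop (r.toNat + 1)) := by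
  intro f
  induction f with
  | zero => intro r hr0 hr7 hf; omega
  | succ f ih =>
    intro r hr0 hr7 hf
    have hcond : r ≥ 0 ∧ r ≤ 7 ∧ kc ≥ 0 ∧ kc ≤ 7 := ⟨hr0, hr7, hkc0, hkc7⟩
    simp only [scanDir, if_pos hcond]
    by_cases h7 : r = 7
    · subst h7
      have hp : get_piece board (7 + 1) (kc + 0) = "." := by
        simp [get_piece]
      rw [hp]
      have hdrop : L.drop ((7 : Int).toNat + 1) = [] := by
        apply List.drop_eq_nil_of_le; omega
      rw [hdrop]
      simp [first_blocker_hits]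
      exact scanDir_out board 1 0 f 8 kc (by omega)
    · set piece := get_piece board (r + 1) (kc + 0) with hpdef
      have hcast : ((r.toNat + 1 : Nat) : Int) = r + 1 := by omega
      have hlt : r.toNat + 1 < 8 := by omega
      have hget : L[r.toNat + 1]? = some piece := by
        rw [hcell (r.toNat + 1) hlt, hcast]
        simp [hpdef]
      have hdrop : L.drop (r.toNat + 1) = piece :: L.drop (r.toNat + 1 + 1) := by
        rw [List.drop_eq_getElem_cons (by omega)]
        have : L[r.toNat + 1] = piece := by
          have := hget; rwa [List.getElem?_eq_getElem (by omega), Option.some.injEq] at this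
        rw [this]
      rw [hdrop]
      by_cases hQ : piece = "Q" ∨ piece = "R"
      · have hne : piece ≠ "." := by rcases hQ with h | h <;> simp [h]
        simp only [first_blocker_hits, if_pos hQ, if_pos hne]
        rcases hQ with h | h <;> simp [h]
      · by_cases hdot : piece = "."
        · have hrec := ih (r + 1) (by omega) (by omega) (by omega)
          have : (r + 1).toNat + 1 = r.toNat + 1 + 1 := by omega
          rw [this] at hrec
          simp only [first_blocker_hits, hdot]
          simpa [hdot] using hrec
        · simp only [first_blocker_hits, if_neg hQ, if_pos hdot]
          simp
          constructor
          · intro h; exact hQ (Or.inl h)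
          · intro h; exact hQ (Or.inr h)

-- upwards along the king's column: A's (-1,0) scan is B's scan of col[:r][::-1]
lemma scan_up (board : List (List String)) (kc : Int) (L : List String)
    (hkc0 : 0 ≤ kc) (hkc7 : kc ≤ 7) (hL : L.length = 8)
    (hcell : ∀ i : Nat, i < 8 → L[i]? = some (get_piece board (i : Int) kc)) :
    ∀ (f : Nat) (r : Int), 0 ≤ r → r ≤ 7 → r.toNat + 1 ≤ f →
      scanDir board (-1) 0 f r kc = first_blocker_hits (L.take r.toNat).reverse := by
  intro f
  induction f with
  | zero => intro r hr0 hr7 hf; omega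
  | succ f ih =>
    intro r hr0 hr7 hf
    have hcond : r ≥ 0 ∧ r ≤ 7 ∧ kc ≥ 0 ∧ kc ≤ 7 := ⟨hr0, hr7, hkc0, hkc7⟩
    simp only [scanDir, if_pos hcond]
    by_cases h0 : r = 0
    · subst h0
      have hp : get_piece board (0 + -1) (kc + 0) = "." := by
        simp [get_piece]
      rw [hp]
      simp [first_blocker_hits]
      exact scanDir_out board (-1) 0 f (-1) kc (by omega)
    · set piece := get_piece board (r + -1) (kc + 0) with hpdef
      have hcast : ((r.toNat - 1 : Nat) : Int) = r + -1 := by omega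
      have hlt : r.toNat - 1 < 8 := by omega
      have hget : L[r.toNat - 1]? = some piece := by
        rw [hcell (r.toNat - 1) hlt, hcast]
        simp [hpdef]
      have hgetE : L[r.toNat - 1] = piece := by
        have := hget; rwa [List.getElem?_eq_getElem (by omega), Option.some.injEq] at this
      have htake : L.take r.toNat = L.take (r.toNat - 1) ++ [piece] := by
        have h1 : r.toNat = (r.toNat - 1) + 1 := by omega
        rw [h1, List.take_add_one, List.getElem?_eq_getElem (by omega), hgetE]
        rfl
      rw [htake, List.reverse_append, List.reverse_singleton, List.singleton_append]
      by_cases hQ : piece = "Q" ∨ piece = "R"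
      · have hne : piece ≠ "." := by rcases hQ with h | h <;> simp [h]
        simp only [first_blocker_hits, if_pos hQ, if_pos hne]
        rcases hQ with h | h <;> simp [h]
      · by_cases hdot : piece = "."
        · have hrec := ih (r + -1) (by omega) (by omega) (by omega)
          have : (r + -1).toNat = r.toNat - 1 := by omega
          rw [this] at hrec
          simp only [first_blocker_hits, hdot]
          simpa [hdot] using hrec
        · simp only [first_blocker_hits, if_neg hQ, if_pos hdot]
          simp
          constructor
          · intro h; exact hQ (Or.inl h)
          · intro h; exact hQ (Or.inr h)

-- ===== VERDICT (by name: the statement is the Claim_ definition above) =====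
theorem check_rowcolumn_spec : Claim_equal_check_rowcolumn := by
  intro board kr kc _hdom hpre
  unfold Spec_check_rowcolumn check_rowcolumn check_rowcolumn_alt
  by_cases hbox : 0 ≤ kr ∧ kr ≤ 7 ∧ 0 ≤ kc ∧ kc ≤ 7
  · obtain ⟨hkr0, hkr7, hkc0, hkc7⟩ := hbox
    obtain ⟨hblen, hrows⟩ := hpre ⟨hkr0, hkr7, hkc0, hkc7⟩
    rw [if_pos ⟨hkr0, hkr7, hkc0, hkc7⟩]
    -- the king's row
    have hkrN : kr.toNat < board.length := by omega
    have hgetbr : PySem.List.pyGet? board kr = some board[kr.toNat] := by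
      rw [PySem.List.pyGet?_of_nonneg board hkr0, List.getElem?_eq_getElem hkrN]
    have hrowlen : 8 ≤ board[kr.toNat].length := by
      apply hrows
      have h8 : kr.toNat < (board.take 8).length := by simp; omega
      have he : (board.take 8)[kr.toNat]'h8 = board[kr.toNat] := List.getElem_take
      rw [← he]
      exact List.getElem_mem h8
    set rowK := board[kr.toNat] with hrowK
    have hRw : PySem.List.slice ((PySem.List.pyGet? board kr).getD []) none (some 8)
        = rowK.take 8 := by
      rw [hgetbr]
      simpa using PySem.List.slice_to (xs := rowK) (b := 8) (by omega)
    have hRlen : (rowK.take 8).length = 8 := by simp; omega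
    have hRcell : ∀ i : Nat, i < 8 → (rowK.take 8)[i]? = some (get_piece board kr (i : Int)) := by
      intro i hi
      have : get_piece board kr (i : Int) = rowK[i]'(by omega) := by
        unfold get_piece
        rw [if_neg (by omega)]
        rw [hgetbr]
        simp only [Option.bind_some]
        rw [PySem.List.pyGet?_natCast, List.getElem?_eq_getElem (by omega)]
        rfl
      rw [this, List.getElem?_take, if_pos hi]
      exact List.getElem?_eq_getElem (by omega)
    -- the king's column
    set colF : Int → String := fun r =>
      ((PySem.List.pyGet? board r).bind (fun rw => PySem.List.pyGet? rw kc)).getD "#" with hcolF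
    set Cl := (PySem.List.pyRange 0 8 1).map colF with hCl
    have hClen : Cl.length = 8 := by
      rw [hCl, List.length_map, PySem.List.length_pyRange_one]; rfl
    have hCcell : ∀ i : Nat, i < 8 → Cl[i]? = some (get_piece board (i : Int) kc) := by
      intro i hi
      have h1 : Cl[i]? = some (colF (i : Int)) := by
        rw [hCl, PySem.List.pyRange_one]
        have h8 : ((8 : Int) - 0).toNat = 8 := by decide
        rw [h8, List.map_map]
        rw [List.getElem?_map, List.getElem?_range hi]
        simp
      rw [h1]
      congr 1
      unfold get_piece
      rw [if_neg (by omega)]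
    have hdown := scan_down board kc Cl hkc0 hkc7 hClen hCcell 9 kr hkr0 hkr7 (by omega)
    have hup := scan_up board kc Cl hkc0 hkc7 hClen hCcell 9 kr hkr0 hkr7 (by omega)
    have hright := scan_right board kr (rowK.take 8) hkr0 hkr7 hRlen hRcell 9 kc hkc0 hkc7 (by omega)
    have hleft := scan_left board kr (rowK.take 8) hkr0 hkr7 hRlen hRcell 9 kc hkc0 hkc7 (by omega)
    -- B's slices are those drops/takes
    have hs1 : PySem.List.slice (rowK.take 8) (some (kc + 1)) none = (rowK.take 8).drop (kc.toNat + 1) := by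
      rw [PySem.List.slice_from _ (by omega)]
      congr 1; omega
    have hs2 : PySem.List.slice (rowK.take 8) none (some kc) = (rowK.take 8).take kc.toNat :=
      PySem.List.slice_to _ (by omega)
    have hs3 : PySem.List.slice Cl (some (kr + 1)) none = Cl.drop (kr.toNat + 1) := by
      rw [PySem.List.slice_from _ (by omega)]
      congr 1; omega
    have hs4 : PySem.List.slice Cl none (some kr) = Cl.take kr.toNat :=
      PySem.List.slice_to _ (by omega)
    simp only [List.any_cons, List.any_nil, Bool.or_false]
    rw [hRw, hs1, hs2, hs3, hs4, hdown, hup, hright, hleft]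
    cases first_blocker_hits ((rowK.take 8).drop (kc.toNat + 1)) <;>
      cases first_blocker_hits ((rowK.take 8).take kc.toNat).reverse <;>
      cases first_blocker_hits (Cl.drop (kr.toNat + 1)) <;>
      cases first_blocker_hits (Cl.take kr.toNat).reverse <;> simp
  · rw [if_neg hbox]
    have h : ¬ (kr ≥ 0 ∧ kr ≤ 7 ∧ kc ≥ 0 ∧ kc ≤ 7) := by
      intro ⟨a, b, c, d⟩; exact hbox ⟨a, b, c, d⟩
    simp [scanDir_out board _ _ 9 kr kc h]
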